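-- pv_equiv track=rewrite | github.com/yahiko1/metaprog_l1 | pp.py | is_multy_string_comment_begin
-- ===== SOURCE A (Python) =====
-- def is_multy_string_comment_begin(line=str()):
--     pos = line.find("/*")
--     if pos == -1:
--         return False
--     for ch in line[0:pos]:
--         if ch != ' ':
--             return False
--     return True
-- ===== SOURCE B (Python) =====
-- def is_multy_string_comment_begin(line=str()):
--     i = 0
--     while i < len(line) and line[i] == ' ':
--         i += 1
--     return line[i:i+2] == "/*"
-- ===== Notes on version B (the rewrite author's own statement) =====
-- stated objective: simpler
-- what changed: Instead of searching for the first "/*" and then validating that everything before it is spaces, B consumes the leading spaces with one index scan and tests whether the next two characters are "/*" via a slice.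
import Mathlib
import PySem

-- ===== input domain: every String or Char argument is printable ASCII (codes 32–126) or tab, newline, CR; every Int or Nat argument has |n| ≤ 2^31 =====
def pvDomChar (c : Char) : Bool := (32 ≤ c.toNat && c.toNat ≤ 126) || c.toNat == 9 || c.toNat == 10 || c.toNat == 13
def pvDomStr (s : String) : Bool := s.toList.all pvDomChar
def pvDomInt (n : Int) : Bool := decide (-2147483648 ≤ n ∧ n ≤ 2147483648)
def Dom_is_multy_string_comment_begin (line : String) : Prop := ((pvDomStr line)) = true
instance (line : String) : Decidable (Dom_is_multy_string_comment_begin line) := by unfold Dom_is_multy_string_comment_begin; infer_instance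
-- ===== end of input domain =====

-- B replaces A's "find \"/*\" then check the prefix is all spaces" with "skip leading
-- spaces, then test the next two characters"; objective: simpler (same O(n) cost).

-- ===== PORT A =====
-- the 'for ch in line[0:pos]: if ch != ' ': return False' loop of A
def pvAllSpaces : List Char → Bool
  | [] => true
  | c :: cs => if c ≠ ' ' then false else pvAllSpaces cs

def is_multy_string_comment_begin (line : String) : Bool :=
  let pos := PySem.Str.find line "/*"
  if pos == -1 then false
  else pvAllSpaces (PySem.List.slice line.toList (some 0) (some pos))

-- ===== PORT B =====
-- the 'while i < len(line) and line[i] == ' ': i += 1' loop of B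
def pvCountLead : List Char → Nat
  | [] => 0
  | c :: cs => if c = ' ' then pvCountLead cs + 1 else 0

def is_multy_string_comment_begin_alt (line : String) : Bool :=
  let i : Int := (pvCountLead line.toList : Int)
  PySem.Str.slice line (some i) (some (i + 2)) == "/*"

-- ===== PRECONDITION & SPEC =====
def Spec_is_multy_string_comment_begin (line : String) (out : Bool) : Prop := out = is_multy_string_comment_begin_alt line
instance (line : String) (out : Bool) : Decidable (Spec_is_multy_string_comment_begin line out) := by unfold Spec_is_multy_string_comment_begin; infer_instance

-- ===== CLAIM (what is proved, stated in full; the proofs are below) =====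
def Claim_equal_is_multy_string_comment_begin : Prop := ∀ (line : String), Dom_is_multy_string_comment_begin line → Spec_is_multy_string_comment_begin line (is_multy_string_comment_begin line)

-- ===== LEMMAS AND PROOFS =====

lemma pvAllSpaces_iff (cs : List Char) : pvAllSpaces cs = true ↔ ∀ c ∈ cs, c = ' ' := by
  induction cs with
  | nil => simp [pvAllSpaces]
  | cons c cs ih =>
    by_cases h : c = ' ' <;> simp [pvAllSpaces, h, ih]

lemma pvCountLead_take (cs : List Char) : ∀ c ∈ cs.take (pvCountLead cs), c = ' ' := by
  induction cs with
  | nil => simp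
  | cons c cs ih =>
    by_cases h : c = ' '
    · simpa [pvCountLead, h] using ih
    · simp [pvCountLead, h]

lemma pvCountLead_eq_of (cs : List Char) (p : Nat) (d : Char)
    (h1 : ∀ c ∈ cs.take p, c = ' ') (h2 : cs[p]? = some d) (h3 : d ≠ ' ') :
    pvCountLead cs = p := by
  induction cs generalizing p with
  | nil => simp at h2
  | cons c cs ih =>
    cases p with
    | zero =>
      simp at h2
      subst h2
      simp [pvCountLead, h3]
    | succ q =>
      have hc : c = ' ' := h1 c (by simp)
      have : pvCountLead cs = q :=
        ih q (fun x hx => h1 x (by simpa using List.mem_cons_of_mem c hx)) (by simpa using h2)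
      simp [pvCountLead, hc, this]

-- B is true iff "/*" is a prefix of the list after the leading spaces
lemma alt_true_iff (line : String) :
    is_multy_string_comment_begin_alt line = true ↔
      ['/', '*'] <+: line.toList.drop (pvCountLead line.toList) := by
  unfold is_multy_string_comment_begin_alt
  rw [beq_iff_eq, ← String.toList_inj, PySem.Str.toList_slice, PySem.Chars.slice_eq_listSlice]
  rw [show ((pvCountLead line.toList : Int) + 2) = ((pvCountLead line.toList : Int) + ((2:Nat) : Int)) by push_cast; ring]
  rw [PySem.List.slice_natCast_add]
  show (line.toList.drop (pvCountLead line.toList)).take 2 = ['/', '*'] ↔ _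
  constructor
  · intro h
    exact h ▸ List.take_prefix 2 _
  · rintro ⟨t, ht⟩
    rw [← ht]
    simp

theorem pv_main (line : String) :
    is_multy_string_comment_begin line = is_multy_string_comment_begin_alt line := by
  unfold is_multy_string_comment_begin
  simp only [PySem.Str.find_eq]
  have hsub : ("/*" : String).toList = ['/', '*'] := rfl
  by_cases hneg : PySem.Chars.find line.toList ("/*".toList) = -1
  · -- A is false: "/*" does not occur; B must be false too
    simp only [hneg, beq_self_eq_true, if_true]
    by_contra hB
    have hBtrue : is_multy_string_comment_begin_alt line = true := by
      cases h : is_multy_string_comment_begin_alt line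
      · exact absurd h.symm (by simpa using hB)
      · rfl
    have hpre := (alt_true_iff line).mp hBtrue
    have : PySem.Chars.isIn ("/*".toList) line.toList = true := by
      rw [PySem.Chars.isIn_iff_infix, hsub]
      exact ((hpre.isInfix).trans (List.drop_suffix _ _).isInfix)
    rw [PySem.Chars.find_eq_neg_one_iff, hsub] at hneg
    rw [PySem.Chars.isIn_iff_infix, hsub] at this
    exact hneg this
  · have hge : 0 ≤ PySem.Chars.find line.toList ("/*".toList) := by
      have := PySem.Chars.neg_one_le_find (s := line.toList) (sub := "/*".toList)
      omega
    obtain ⟨hpref, hmin⟩ := PySem.Chars.find_spec (s := line.toList) (sub := "/*".toList) hge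
    set p := (PySem.Chars.find line.toList ("/*".toList)).toNat with hp
    simp only [show (PySem.Chars.find line.toList ("/*".toList) == -1) = false by
      simpa using hneg, Bool.false_eq_true, if_false]
    rw [PySem.List.slice_zero_start, PySem.List.slice_to line.toList hge, ← hp]
    rw [hsub] at hpref
    -- the character at index p is '/'
    have hslash : line.toList[p]? = some '/' := by
      obtain ⟨t, ht⟩ := hpref
      have : (line.toList.drop p)[0]? = some '/' := by rw [← ht]; rfl
      simpa [List.getElem?_drop] using this
    by_cases hAS : pvAllSpaces (line.toList.take p) = true
    · -- A true: leading-space count is exactly p, and "/*" follows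
      rw [hAS]
      have hcount : pvCountLead line.toList = p :=
        pvCountLead_eq_of _ p '/' ((pvAllSpaces_iff _).mp hAS) hslash (by decide)
      exact ((alt_true_iff line).mpr (by rw [hcount]; exact hpref)).symm
    · -- A false: some non-space before p, so B's "/*" test must fail (minimality of find)
      have hAfalse : pvAllSpaces (line.toList.take p) = false := by
        cases h : pvAllSpaces (line.toList.take p)
        · rfl
        · exact absurd h hAS
      rw [hAfalse]
      by_contra hB
      have hBtrue : is_multy_string_comment_begin_alt line = true := by
        cases h : is_multy_string_comment_begin_alt line
        · exact absurd h.symm (by simpa using hB)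
        · rfl
      have hpre := (alt_true_iff line).mp hBtrue
      -- the leading-space count i is < p
      have hi : pvCountLead line.toList < p := by
        by_contra hle
        push Not at hle
        obtain ⟨c, hc, hcne⟩ : ∃ c ∈ line.toList.take p, c ≠ ' ' := by
          by_contra hall
          push Not at hall
          exact hAS ((pvAllSpaces_iff _).mpr hall)
        have : c ∈ line.toList.take (pvCountLead line.toList) := by
          have h2 : line.toList.take p = (line.toList.take (pvCountLead line.toList)).take p := by
            rw [List.take_take, Nat.min_eq_left hle]
          rw [h2] at hc
          exact List.mem_of_mem_take hc
        exact hcne (pvCountLead_take _ c this)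
      exact hmin _ hi (by rw [hsub]; exact hpre)

-- ===== VERDICT (by name: the statement is the Claim_ definition above) =====
theorem is_multy_string_comment_begin_spec : Claim_equal_is_multy_string_comment_begin := by
  intro line _
  unfold Spec_is_multy_string_comment_begin
  exact pv_main line
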